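-- pv_equiv track=rewrite | github.com/dimas-defender/BMSTU | AlgAnalysis/lab7/lab7.py | segm_search
-- ===== SOURCE A (Python) =====
-- def binary_search(dic : dict, key : str):
--     keyarr = list(dic.keys())
--     keyarr.sort()
--     first = 0
--     last = len(keyarr)-1
--     res = -1
--     cmpcnt = 0
--     while (first <= last) and (res == -1):
--         mid = (first + last) // 2
--         cmpcnt += 1
--         if keyarr[mid] == key:
--             return cmpcnt, dic.get(key)
--         else:
--             cmpcnt += 1
--             if key < keyarr[mid]:
--                 last = mid - 1
--             else:
--                 first = mid + 1
--     return cmpcnt, 0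
--
-- def segm_search(dic : dict, key : str):
--     segms = []
--     for i in range(13):
--         segms.append(dict())
--     for elem in dic:
--         value = dic.get(elem)
--         if value > 40:
--             segms[0].update([(elem, value)])
--         elif value > 19:
--             segms[1].update([(elem, value)])
--         elif value > 10:
--             segms[2].update([(elem, value)])
--         else:
--             for i in range(1, 11):
--                 if value == i:
--                     segms[13 - i].update([(elem, value)])
--     #segms.sort(key = sumvaluesdic, reverse = True)
--     counter = 0
--     j = 0
--     while j < 13:
--         res = binary_search(segms[j], key)
--         counter += res[0]
--         if res[1]:
--             return counter, res[1]
--         j += 1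
--
--     return counter, 0
-- ===== SOURCE B (Python) =====
-- # Alternative decomposition: no 13-dict bucketing pass -- each segment's sorted key
-- # list is filtered directly via an arithmetic segment function, and the comparison-
-- # counting binary search is a structural recursion on list halves instead of an
-- # index-based while loop.
--
-- def _seg(v):
--     if v > 40:
--         return 0
--     if v > 19:
--         return 1
--     if v > 10:
--         return 2
--     if 1 <= v <= 10:
--         return 13 - v
--     return None
--
-- def _search(arr, key, c):
--     if not arr:
--         return c, False
--     m = (len(arr) - 1) // 2
--     if arr[m] == key:
--         return c + 1, True
--     c += 2
--     if key < arr[m]: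
--         return _search(arr[:m], key, c)
--     return _search(arr[m + 1:], key, c)
--
-- def segm_search(dic, key):
--     counter = 0
--     for j in range(13):
--         arr = sorted(k for k, v in dic.items() if _seg(v) == j)
--         c, found = _search(arr, key, 0)
--         counter += c
--         if found:
--             return counter, dic[key]
--     return counter, 0
-- ===== Notes on version B (the rewrite author's own statement) =====
-- stated objective: alternative
-- what changed: B drops A's mutable 13-dict bucketing pass (with its inner range(1,11) scan) in favour of an arithmetic segment function plus a direct filter-and-sort per segment, and replaces the index-based iterative binary search with a structural divide-and-conquer recursion on list halves, returning a found-flag instead of the value.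
import Mathlib
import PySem

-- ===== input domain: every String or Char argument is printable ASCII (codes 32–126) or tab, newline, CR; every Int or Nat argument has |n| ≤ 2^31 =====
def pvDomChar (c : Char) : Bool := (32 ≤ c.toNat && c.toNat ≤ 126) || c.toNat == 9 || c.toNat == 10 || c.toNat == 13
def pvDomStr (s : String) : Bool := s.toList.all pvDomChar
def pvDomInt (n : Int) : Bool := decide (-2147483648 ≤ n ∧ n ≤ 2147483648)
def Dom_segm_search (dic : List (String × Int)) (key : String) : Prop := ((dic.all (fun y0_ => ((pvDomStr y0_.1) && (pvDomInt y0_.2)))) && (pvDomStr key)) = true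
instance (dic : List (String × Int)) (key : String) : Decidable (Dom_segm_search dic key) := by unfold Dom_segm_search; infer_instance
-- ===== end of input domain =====

-- B replaces A's 13-dict bucketing pass and index-based binary-search loop with a direct
-- per-segment filter + sort and a structural divide-and-conquer search on list halves
-- (objective: alternative decomposition, same exact outputs and comparison counts).

-- ===== PORT A =====
-- segms[i].update([(elem, value)])  (the list of dicts with the dict at index i updated;
-- every index used is in range, so List.set/getD is exact)
def pvSegUpdate (segms : List (PySem.Dict String Int)) (i : Nat) (elem : String)
    (value : Int) : List (PySem.Dict String Int) :=
  segms.set i ((segms.getD i PySem.Dict.empty).update [(elem, value)])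

-- the body of A's 'for elem in dic' loop
def pvSegStep (segms : List (PySem.Dict String Int)) (elem : String) (value : Int) :
    List (PySem.Dict String Int) :=
  if value > 40 then pvSegUpdate segms 0 elem value
  else if value > 19 then pvSegUpdate segms 1 elem value
  else if value > 10 then pvSegUpdate segms 2 elem value
  else
    (PySem.List.pyRange 1 11 1).foldl
      (fun s i => if value == i then pvSegUpdate s (13 - i).toNat elem value else s) segms

-- A's while loop of binary_search; 'res == -1' is always true when the condition is
-- re-tested (res is only set by returning), so the loop condition is first ≤ last.
-- keyarr[mid] is always in range here, so pyGetD is exact.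
def pvBinGoA (keyarr : List String) (d : PySem.Dict String Int) (key : String)
    (first last cmpcnt : Int) : Int × Int :=
  if h : first ≤ last then
    let mid := PySem.Int.floordiv (first + last) 2
    let c1 := cmpcnt + 1
    if PySem.List.pyGetD keyarr mid "" == key then
      (c1, d.getD key 0)  -- dic.get(key): key was just found in keyarr, so it is present
    else
      let c2 := c1 + 1
      if key < PySem.List.pyGetD keyarr mid "" then
        pvBinGoA keyarr d key first (mid - 1) c2
      else
        pvBinGoA keyarr d key (mid + 1) last c2
  else (cmpcnt, 0)
termination_by (last - first + 1).toNat
decreasing_by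
  all_goals
    have hb := PySem.Int.floordiv_two_mid_bounds (lo := first) (hi := last) h
    omega

def pvBinarySearchA (d : PySem.Dict String Int) (key : String) : Int × Int :=
  let keyarr := PySem.List.sorted d.keys (fun x => x) false
  pvBinGoA keyarr d key 0 ((keyarr.length : Int) - 1) 0

-- A's 'while j < 13' loop; j starts at 0 and only increases, so Nat is exact,
-- and segms[j] is in range (segms has 13 elements), so List.getD is exact.
def pvSearchLoopA (segms : List (PySem.Dict String Int)) (key : String)
    (counter : Int) (j : Nat) : Int × Int :=
  if j < 13 then
    let res := pvBinarySearchA (segms.getD j PySem.Dict.empty) key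
    let counter := counter + res.1
    if res.2 ≠ 0 then (counter, res.2)  -- 'if res[1]:' — int truthiness
    else pvSearchLoopA segms key counter (j + 1)
  else (counter, 0)
termination_by 13 - j

def segm_search (dic : List (String × Int)) (key : String) : Int × Int :=
  let d := PySem.Dict.ofList dic
  let segms0 := (PySem.List.pyRange 0 13 1).foldl (fun acc _ => acc ++ [PySem.Dict.empty]) []
  -- 'for elem in dic: value = dic.get(elem); …' — elem is always a key of d
  let segms := d.keys.foldl (fun s elem => pvSegStep s elem (d.getD elem 0)) segms0
  pvSearchLoopA segms key 0 0

-- ===== PORT B =====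
def pvSegOf (v : Int) : Option Int :=
  if v > 40 then some 0
  else if v > 19 then some 1
  else if v > 10 then some 2
  else if 1 ≤ v ∧ v ≤ 10 then some (13 - v)
  else none

-- _search(arr, key, c): structural recursion on list halves; arr[m] is in range
-- (0 ≤ m < len arr), and arr[:m] / arr[m+1:] are List.take m / List.drop (m+1).
def pvSearchB (arr : List String) (key : String) (c : Int) : Int × Bool :=
  if harr : arr = [] then (c, false)
  else
    let m := (arr.length - 1) / 2
    if PySem.List.pyGetD arr (m : Int) "" == key then (c + 1, true)
    else if key < PySem.List.pyGetD arr (m : Int) "" then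
      pvSearchB (arr.take m) key (c + 2)
    else
      pvSearchB (arr.drop (m + 1)) key (c + 2)
termination_by arr.length
decreasing_by
  · have : arr.length ≠ 0 := fun h => harr (List.eq_nil_of_length_eq_zero h)
    simp only [List.length_take]; omega
  · have : arr.length ≠ 0 := fun h => harr (List.eq_nil_of_length_eq_zero h)
    simp only [List.length_drop]; omega

-- 'for j in range(13)' with early return, over the segment indices still to try
def pvSegLoopB (items : List (String × Int)) (d : PySem.Dict String Int) (key : String) :
    List Int → Int → Int × Int
  | [], counter => (counter, 0)
  | j :: rest, counter =>
    let arr := PySem.List.sorted ((items.filter (fun q => pvSegOf q.2 == some j)).map (·.1))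
      (fun x => x) false
    let r := pvSearchB arr key 0
    let counter := counter + r.1
    if r.2 then (counter, d.getD key 0)  -- dic[key]: found, so key is present
    else pvSegLoopB items d key rest counter

def segm_search_alt (dic : List (String × Int)) (key : String) : Int × Int :=
  let d := PySem.Dict.ofList dic
  pvSegLoopB d.items d key (PySem.List.pyRange 0 13 1) 0

-- ===== PRECONDITION & SPEC =====
def Spec_segm_search (dic : List (String × Int)) (key : String) (out : Int × Int) : Prop := out = segm_search_alt dic key
instance (dic : List (String × Int)) (key : String) (out : Int × Int) : Decidable (Spec_segm_search dic key out) := by unfold Spec_segm_search; infer_instance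

-- ===== CLAIM (what is proved, stated in full; the proofs are below) =====
def Claim_equal_segm_search : Prop := ∀ (dic : List (String × Int)) (key : String), Dom_segm_search dic key → Spec_segm_search dic key (segm_search dic key)

-- ===== LEMMAS AND PROOFS =====

-- segment j of A's bucket table, described directly as a filter of the items list
def pvSeg (l : List (String × Int)) (j : Int) : PySem.Dict String Int :=
  PySem.Dict.mk (l.filter (fun q => pvSegOf q.2 == some j))

def pvSegTable (l : List (String × Int)) : List (PySem.Dict String Int) :=
  (PySem.List.pyRange 0 13 1).map (pvSeg l)

theorem pvRange13_len : (PySem.List.pyRange 0 13 1).length = 13 := by decide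

theorem pvRange13_getElem (i : Nat) (h : i < (PySem.List.pyRange 0 13 1).length) :
    (PySem.List.pyRange 0 13 1)[i] = (i : Int) := by
  have h13 : i < 13 := by rw [pvRange13_len] at h; exact h
  interval_cases i <;> rfl

theorem pvSegOf_bounds (v : Int) (j : Int) (h : pvSegOf v = some j) : 0 ≤ j ∧ j < 13 := by
  unfold pvSegOf at h
  split_ifs at h <;> simp_all <;> omega

theorem pvSegOf_ne_zero (v : Int) (j : Int) (h : pvSegOf v = some j) : v ≠ 0 := by
  unfold pvSegOf at h
  split_ifs at h <;> omega

theorem pvSegStep_eq (s : List (PySem.Dict String Int)) (elem : String) (v : Int) :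
    pvSegStep s elem v =
      (match pvSegOf v with
       | some j => pvSegUpdate s j.toNat elem v
       | none => s) := by
  unfold pvSegStep pvSegOf
  split_ifs with h1 h2 h3 h4
  · rfl
  · rfl
  · rfl
  · obtain ⟨hl, hr⟩ := h4
    have hrange : PySem.List.pyRange 1 11 1 = [1,2,3,4,5,6,7,8,9,10] := by decide
    rw [hrange]
    interval_cases v <;> rfl
  · have hrange : PySem.List.pyRange 1 11 1 = [1,2,3,4,5,6,7,8,9,10] := by decide
    rw [hrange, PySem.List.foldl_congr_mem (g := fun s _ => s), PySem.List.foldl_ignore]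
    intro acc x hx
    have hvx : v ≠ x := by
      fin_cases hx <;> omega
    simp [hvx]

theorem pvSegTable_step_some (l : List (String × Int)) (p : String × Int) (j : Int)
    (hj : pvSegOf p.2 = some j) (hp : p.1 ∉ l.map Prod.fst) :
    pvSegUpdate (pvSegTable l) j.toNat p.1 p.2 = pvSegTable (l ++ [p]) := by
  obtain ⟨hj0, hj13⟩ := pvSegOf_bounds p.2 j hj
  unfold pvSegUpdate pvSegTable
  have hlen : j.toNat < ((PySem.List.pyRange 0 13 1).map (pvSeg l)).length := by
    rw [List.length_map, pvRange13_len]; omega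
  rw [List.getD_eq_getElem _ _ hlen, List.getElem_map, pvRange13_getElem]
  have hjcast : ((j.toNat : Nat) : Int) = j := by omega
  rw [hjcast]
  have hcont : (pvSeg l j).contains p.1 = false := by
    rw [PySem.Dict.contains_eq_decide_mem_keys]
    simp only [decide_eq_false_iff_not]
    intro hmem
    apply hp
    obtain ⟨q, hq, hqe⟩ := List.mem_map.mp hmem
    exact hqe ▸ List.mem_map.mpr ⟨q, List.mem_of_mem_filter hq, rfl⟩
  have hupd : ∀ (d : PySem.Dict String Int), d.update [(p.1, p.2)] = d.insert p.1 p.2 :=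
    fun _ => rfl
  rw [hupd]
  have hins : (pvSeg l j).insert p.1 p.2 = pvSeg (l ++ [p]) j := by
    apply PySem.Dict.ext
    rw [PySem.Dict.items_insert_of_not_contains (h := hcont)]
    show l.filter _ ++ [(p.1, p.2)] = (l ++ [p]).filter _
    rw [List.filter_append]
    congr 1
    simp [hj]
  rw [hins]
  apply List.ext_getElem
  · simp
  · intro i hi1 hi2
    simp only [List.length_set, List.length_map, pvRange13_len] at hi1
    rw [List.getElem_set]
    by_cases hij : j.toNat = i
    · rw [if_pos hij]
      subst hij
      rw [List.getElem_map, pvRange13_getElem, hjcast]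
    · rw [if_neg hij]
      rw [List.getElem_map, List.getElem_map, pvRange13_getElem]
      unfold pvSeg
      congr 1
      rw [List.filter_append]
      have hfalse2 : (pvSegOf p.2 == some ((i : Nat) : Int)) = false := by
        rw [hj]
        simp only [beq_eq_false_iff_ne, ne_eq, Option.some.injEq]
        omega
      simp [hfalse2]

theorem pvSegTable_step_none (l : List (String × Int)) (p : String × Int)
    (hj : pvSegOf p.2 = none) :
    pvSegTable l = pvSegTable (l ++ [p]) := by
  unfold pvSegTable
  apply List.map_congr_left
  intro j _
  unfold pvSeg
  congr 1
  rw [List.filter_append]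
  simp [hj]

theorem pvSegTable_step (l : List (String × Int)) (p : String × Int)
    (hp : p.1 ∉ l.map Prod.fst) :
    pvSegStep (pvSegTable l) p.1 p.2 = pvSegTable (l ++ [p]) := by
  rw [pvSegStep_eq]
  cases hj : pvSegOf p.2 with
  | none => exact pvSegTable_step_none l p hj
  | some j => exact pvSegTable_step_some l p j hj hp

theorem pvSegTable_fold (l : List (String × Int)) (pre : List (String × Int))
    (h : ((pre ++ l).map Prod.fst).Nodup) :
    l.foldl (fun s p => pvSegStep s p.1 p.2) (pvSegTable pre) = pvSegTable (pre ++ l) := by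
  induction l generalizing pre with
  | nil => simp
  | cons p l ih =>
    have hp : p.1 ∉ pre.map Prod.fst := by
      simp only [List.map_append, List.nodup_append] at h
      intro hc
      have := h.2.2 p.1 hc
      simp at this
    calc (p :: l).foldl (fun s q => pvSegStep s q.1 q.2) (pvSegTable pre)
        = l.foldl (fun s q => pvSegStep s q.1 q.2) (pvSegTable (pre ++ [p])) := by
          rw [List.foldl_cons, pvSegTable_step pre p hp]
      _ = pvSegTable (pre ++ [p] ++ l) := ih (pre ++ [p]) (by rw [List.append_assoc]; exact h)
      _ = pvSegTable (pre ++ p :: l) := by simp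

theorem pvSearchB_found_mem (arr : List String) (key : String) (c : Int)
    (h : (pvSearchB arr key c).2 = true) : key ∈ arr := by
  fun_induction pvSearchB arr key c with
  | case1 => simp at h
  | case2 arr c harr m heq =>
    have hne : arr.length ≠ 0 := fun h0 => harr (List.eq_nil_of_length_eq_zero h0)
    have hm : m < arr.length := by have hmdef : m = (arr.length - 1) / 2 := rfl; omega
    have hget := PySem.List.pyGetD_eq_getElem (xs := arr) (i := ((m : Nat) : Int)) (d := "")
      (by omega) (by omega)
    rw [hget, beq_iff_eq] at heq
    exact heq ▸ List.getElem_mem _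
  | case3 arr c harr m heq hlt ih => exact List.mem_of_mem_take (ih h)
  | case4 arr c harr m heq hlt ih => exact List.mem_of_mem_drop (ih h)

theorem pvSearchAB (d : PySem.Dict String Int) (key : String) :
    ∀ (n : Nat) (keyarr : List String) (first last c : Int),
      0 ≤ first → last < (keyarr.length : Int) → n = (last + 1 - first).toNat →
      pvBinGoA keyarr d key first last c =
        (let r := pvSearchB (List.take n (List.drop first.toNat keyarr)) key c
         (r.1, if r.2 then d.getD key 0 else 0)) := by
  intro n
  induction n using Nat.strong_induction_on with
  | _ n ih =>
    intro keyarr first last c h0 hlast hn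
    by_cases h : first ≤ last
    · have hn1 : 1 ≤ n := by omega
      set sub := List.take n (List.drop first.toNat keyarr) with hsub
      have hlen_sub : sub.length = n := by
        rw [hsub]; simp only [List.length_take, List.length_drop]; omega
      have hne : sub ≠ [] := by
        intro hc; rw [hc] at hlen_sub; simp at hlen_sub; omega
      set m : Nat := (n - 1) / 2 with hm
      have hmid : PySem.Int.floordiv (first + last) 2 = first + (m : Int) := by
        rw [PySem.Int.floordiv_eq_ediv_of_pos (by norm_num)]
        omega
      have hidx : first.toNat + m < keyarr.length := by omega
      have e1 := PySem.List.pyGetD_eq_getElem (xs := sub) (i := ((m : Nat) : Int)) (d := "")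
        (by omega) (by omega)
      have e2 := PySem.List.pyGetD_eq_getElem (xs := keyarr) (i := first + (m : Int)) (d := "")
        (by omega) (by omega)
      have helem : PySem.List.pyGetD sub ((m : Nat) : Int) "" =
          PySem.List.pyGetD keyarr (first + (m : Int)) "" := by
        rw [e1, e2]
        simp only [hsub, List.getElem_take, List.getElem_drop]
        congr 1
        omega
      have hL : pvBinGoA keyarr d key first last c =
          (if (PySem.List.pyGetD keyarr (PySem.Int.floordiv (first + last) 2) "" == key) = true
             then (c + 1, d.getD key 0)
           else if key < PySem.List.pyGetD keyarr (PySem.Int.floordiv (first + last) 2) "" then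
             pvBinGoA keyarr d key first (PySem.Int.floordiv (first + last) 2 - 1) (c + 1 + 1)
           else
             pvBinGoA keyarr d key (PySem.Int.floordiv (first + last) 2 + 1) last (c + 1 + 1)) := by
        rw [pvBinGoA, dif_pos h]
      have hR : pvSearchB sub key c =
          (if (PySem.List.pyGetD sub (((sub.length - 1) / 2 : Nat) : Int) "" == key) = true
             then (c + 1, true)
           else if key < PySem.List.pyGetD sub (((sub.length - 1) / 2 : Nat) : Int) "" then
             pvSearchB (sub.take ((sub.length - 1) / 2)) key (c + 2)
           else pvSearchB (sub.drop ((sub.length - 1) / 2 + 1)) key (c + 2)) := by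
        rw [pvSearchB, dif_neg hne]
      have hms : ((sub.length - 1) / 2 : Nat) = m := by rw [hlen_sub]
      rw [hL, hmid]
      conv_rhs => rw [hR]
      rw [hms, helem]
      by_cases hkey : (PySem.List.pyGetD keyarr (first + (m : Int)) "" == key) = true
      · rw [if_pos hkey, if_pos hkey]
        rfl
      · rw [if_neg hkey, if_neg hkey]
        by_cases hlt : key < PySem.List.pyGetD keyarr (first + (m : Int)) ""
        · rw [if_pos hlt, if_pos hlt]
          have hc2 : c + 1 + 1 = c + 2 := by ring
          rw [hc2]
          have hrec := ih m (by omega) keyarr first (first + (m : Int) - 1) (c + 2)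
            h0 (by omega) (by omega)
          rw [hrec]
          have hT : List.take m (List.drop first.toNat keyarr) = sub.take m := by
            rw [hsub, List.take_take, min_eq_left (by omega)]
          rw [hT]
        · rw [if_neg hlt, if_neg hlt]
          have hc2 : c + 1 + 1 = c + 2 := by ring
          rw [hc2]
          have hrec := ih (n - 1 - m) (by omega) keyarr (first + (m : Int) + 1) last (c + 2)
            (by omega) hlast (by omega)
          rw [hrec]
          have hT : List.take (n - 1 - m) (List.drop (first + (m : Int) + 1).toNat keyarr)
              = sub.drop (m + 1) := by
            rw [hsub, List.drop_take, List.drop_drop]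
            congr 1
            · omega
            · congr 1
              omega
          rw [hT]
    · rw [pvBinGoA, dif_neg h]
      have hn0 : n = 0 := by omega
      subst hn0
      simp [pvSearchB]

theorem pvLoopAB (items : List (String × Int)) (d : PySem.Dict String Int) (key : String)
    (hnd : (items.map Prod.fst).Nodup)
    (hd : ∀ k v, (k, v) ∈ items → d.getD k 0 = v) :
    ∀ (fuel jn : Nat) (c : Int), jn + fuel = 13 →
      pvSearchLoopA (pvSegTable items) key c jn =
        pvSegLoopB items d key (PySem.List.pyRange (jn : Int) 13 1) c := by
  intro fuel
  induction fuel with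
  | zero =>
    intro jn c h13
    have hjn : jn = 13 := by omega
    subst hjn
    rw [pvSearchLoopA, if_neg (by omega), PySem.List.pyRange_one_eq_nil (by norm_num)]
    rfl
  | succ fuel ih =>
    intro jn c h13
    have hjn : jn < 13 := by omega
    rw [PySem.List.pyRange_one_cons (by exact_mod_cast hjn)]
    have hg : (pvSegTable items).getD jn PySem.Dict.empty = pvSeg items ((jn : Nat) : Int) := by
      unfold pvSegTable
      have hlen : jn < ((PySem.List.pyRange 0 13 1).map (pvSeg items)).length := by
        rw [List.length_map, pvRange13_len]; omega
      rw [List.getD_eq_getElem _ _ hlen, List.getElem_map, pvRange13_getElem]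
    set A := PySem.List.sorted
      ((items.filter (fun q => pvSegOf q.2 == some ((jn : Nat) : Int))).map (·.1))
      (fun x => x) false with hA
    have hbin : pvBinarySearchA (pvSeg items ((jn : Nat) : Int)) key =
        (let r := pvSearchB A key 0
         (r.1, if r.2 then (pvSeg items ((jn : Nat) : Int)).getD key 0 else 0)) := by
      unfold pvBinarySearchA
      have hs := pvSearchAB (pvSeg items ((jn : Nat) : Int)) key A.length A 0
        ((A.length : Int) - 1) 0 (le_refl 0) (by omega) (by omega)
      simp only [Int.toNat_zero, List.drop_zero, List.take_length] at hs
      exact hs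
    have hAstep : pvSearchLoopA (pvSegTable items) key c jn =
        (if (pvBinarySearchA (pvSeg items ((jn : Nat) : Int)) key).2 ≠ 0 then
           (c + (pvBinarySearchA (pvSeg items ((jn : Nat) : Int)) key).1,
            (pvBinarySearchA (pvSeg items ((jn : Nat) : Int)) key).2)
         else pvSearchLoopA (pvSegTable items) key
           (c + (pvBinarySearchA (pvSeg items ((jn : Nat) : Int)) key).1) (jn + 1)) := by
      rw [pvSearchLoopA, if_pos hjn, hg]
    have hBstep : pvSegLoopB items d key (((jn : Nat) : Int) :: PySem.List.pyRange (((jn : Nat) : Int) + 1) 13 1) c =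
        (if (pvSearchB A key 0).2 then (c + (pvSearchB A key 0).1, d.getD key 0)
         else pvSegLoopB items d key (PySem.List.pyRange (((jn : Nat) : Int) + 1) 13 1)
           (c + (pvSearchB A key 0).1)) := rfl
    rw [hAstep, hBstep, hbin]
    rcases hrq : pvSearchB A key 0 with ⟨rc, rf⟩
    cases rf with
    | true =>
      have hkeymem : key ∈ A := pvSearchB_found_mem A key 0 (by rw [hrq])
      rw [hA, PySem.List.mem_sorted] at hkeymem
      obtain ⟨q, hqf, hqe⟩ := List.mem_map.mp hkeymem
      obtain ⟨hqi, hqp⟩ := List.mem_filter.mp hqf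
      have hvj : pvSegOf q.2 = some ((jn : Nat) : Int) := by
        simpa using hqp
      have hvne : q.2 ≠ 0 := pvSegOf_ne_zero _ _ hvj
      have hqkey : (key, q.2) ∈ items.filter (fun q => pvSegOf q.2 == some ((jn : Nat) : Int)) := by
        rw [← hqe]
        simpa using hqf
      have hsegnd : (pvSeg items ((jn : Nat) : Int)).keys.Nodup := by
        show ((items.filter (fun q => pvSegOf q.2 == some ((jn : Nat) : Int))).map (·.1)).Nodup
        exact hnd.sublist (List.Sublist.map _ List.filter_sublist)
      have hseg : (pvSeg items ((jn : Nat) : Int)).getD key 0 = q.2 :=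
        PySem.Dict.getD_of_mem_items (pvSeg items ((jn : Nat) : Int)) hqkey hsegnd 0
      have hdkey : d.getD key 0 = q.2 := by
        apply hd
        rw [← hqe]
        simpa using List.mem_of_mem_filter hqf
      rw [if_pos (by rw [hseg]; exact hvne)]
      rw [hseg, hdkey]
      simp
    | false =>
      rw [if_neg (by simp), if_neg (by simp)]
      have hrec := ih (jn + 1) (c + rc) (by omega)
      rw [hrec]
      norm_num

-- ===== VERDICT (by name: the statement is the Claim_ definition above) =====
theorem segm_search_spec : Claim_equal_segm_search := by
  unfold Claim_equal_segm_search Spec_segm_search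
  intro dic key _
  have e1 : segm_search dic key =
      pvSearchLoopA ((PySem.Dict.ofList dic).keys.foldl
        (fun s elem => pvSegStep s elem ((PySem.Dict.ofList dic).getD elem 0))
        ((PySem.List.pyRange 0 13 1).foldl (fun acc _ => acc ++ [PySem.Dict.empty]) []))
        key 0 0 := rfl
  have e2 : segm_search_alt dic key =
      pvSegLoopB (PySem.Dict.ofList dic).items (PySem.Dict.ofList dic) key
        (PySem.List.pyRange 0 13 1) 0 := rfl
  rw [e1, e2]
  set d := PySem.Dict.ofList dic with hdd
  have hnd : d.keys.Nodup := PySem.Dict.nodup_keys_ofList dic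
  have hndf : (d.items.map Prod.fst).Nodup := hnd
  have hseg0 : ((PySem.List.pyRange 0 13 1).foldl
      (fun acc _ => acc ++ [PySem.Dict.empty]) ([] : List (PySem.Dict String Int)))
      = pvSegTable [] := rfl
  have hitems : d.items = d.keys.map (fun k => (k, d.getD k 0)) :=
    PySem.Dict.items_eq_map_keys d hnd 0
  have hfold : d.keys.foldl (fun s elem => pvSegStep s elem (d.getD elem 0)) (pvSegTable [])
      = pvSegTable d.items := by
    have hmain := pvSegTable_fold d.items [] (by simpa using hndf)
    conv_lhs at hmain => rw [hitems, List.foldl_map]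
    simpa using hmain
  rw [hseg0, hfold]
  have hd : ∀ (k : String) (v : Int), (k, v) ∈ d.items → d.getD k 0 = v :=
    fun k v h => PySem.Dict.getD_of_mem_items d h hnd 0
  have hloop := pvLoopAB d.items d key hndf hd 13 0 0 (by omega)
  simpa using hloop
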